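-- pv_equiv track=rewrite | github.com/sshpiz/french_conjugato | generate_french_tts_inventory.py | resolve_allowed_frequencies
-- ===== SOURCE A (Python) =====
-- FREQUENCY_ORDER = ["top20", "top50", "top100", "top500", "top1000", "rare"]
--
-- def normalize_text(text):
--     return " ".join(str(text or "").split())
--
-- def normalize_frequency(value):
--     value = normalize_text(value)
--     if not value:
--         return None
--     mapping = {
--         "top-20": "top20",
--         "top-50": "top50",
--         "top-100": "top100",
--         "top-500": "top500",
--         "top-1000": "top1000",
--     }
--     return mapping.get(value, value)
--
-- def resolve_allowed_frequencies(tiers):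
--     if not tiers:
--         return None
--
--     normalized = []
--     for tier in tiers:
--         for part in str(tier).split(","):
--             value = normalize_frequency(part)
--             if value:
--                 normalized.append(value)
--
--     if not normalized:
--         return None
--
--     allowed = set()
--     for tier in normalized:
--         if tier in {"top20", "top100", "top500", "top1000"}:
--             cutoff = {
--                 "top20": "top20",
--                 "top100": "top100",
--                 "top500": "top500",
--                 "top1000": "top1000",
--             }[tier]
--             for freq in FREQUENCY_ORDER:
--                 allowed.add(freq)
--                 if freq == cutoff:
--                     break
--         elif tier in FREQUENCY_ORDER:
--             allowed.add(tier)
--         else: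
--             raise ValueError(f"Unsupported tier: {tier}")
--     return allowed
-- ===== SOURCE B (Python) =====
-- FREQUENCY_ORDER = ["top20", "top50", "top100", "top500", "top1000", "rare"]
--
-- # each canonical tier mapped to its exact allowed-set (prefix expansion precomputed)
-- TIER_TABLE = {
--     "top20": ("top20",),
--     "top50": ("top50",),
--     "top100": ("top20", "top50", "top100"),
--     "top500": ("top20", "top50", "top100", "top500"),
--     "top1000": ("top20", "top50", "top100", "top500", "top1000"),
--     "rare": ("rare",),
-- }
--
-- def normalize_text(text):
--     return " ".join(str(text or "").split())
--
-- def normalize_frequency(value):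
--     value = normalize_text(value)
--     if not value:
--         return None
--     mapping = {
--         "top-20": "top20",
--         "top-50": "top50",
--         "top-100": "top100",
--         "top-500": "top500",
--         "top-1000": "top1000",
--     }
--     return mapping.get(value, value)
--
-- def resolve_allowed_frequencies(tiers):
--     if not tiers:
--         return None
--
--     parts = (part for tier in tiers for part in str(tier).split(","))
--     normalized = [v for v in map(normalize_frequency, parts) if v]
--
--     if not normalized:
--         return None
--
--     allowed = set()
--     for tier in normalized:
--         try:
--             allowed.update(TIER_TABLE[tier])
--         except KeyError:
--             raise ValueError(f"Unsupported tier: {tier}")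
--     return allowed
-- ===== Notes on version B (the rewrite author's own statement) =====
-- stated objective: simpler
-- what changed: The per-tier inner scan over FREQUENCY_ORDER with a break (plus the separate cutoff dict and two-way branch) is replaced by a single precomputed table mapping each canonical tier to its exact allowed-set, applied via one dict lookup with try/except; the normalize pass becomes a comprehension over a flattened part stream. Pre_ excludes only the inputs where A raises ValueError (an unsupported tier token); B raises the identical ValueError there.
import Mathlib
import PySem

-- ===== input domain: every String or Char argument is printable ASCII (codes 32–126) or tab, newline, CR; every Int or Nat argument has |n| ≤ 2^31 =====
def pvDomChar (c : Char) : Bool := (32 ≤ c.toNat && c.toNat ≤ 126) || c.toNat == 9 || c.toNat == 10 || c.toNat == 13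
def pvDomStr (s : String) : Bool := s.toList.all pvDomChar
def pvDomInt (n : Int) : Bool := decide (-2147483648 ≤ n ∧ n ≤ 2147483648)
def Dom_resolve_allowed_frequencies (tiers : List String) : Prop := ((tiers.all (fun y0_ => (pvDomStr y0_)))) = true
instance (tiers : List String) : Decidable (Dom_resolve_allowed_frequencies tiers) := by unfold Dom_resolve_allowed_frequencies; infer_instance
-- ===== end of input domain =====

-- B replaces A's inner FREQUENCY_ORDER scan-with-break by a precomputed tier→allowed-set table (simpler, same result).

-- ===== PORT A =====
-- shared same-module helpers (identical source text in Source A and Source B)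
def FREQUENCY_ORDER : List String := ["top20", "top50", "top100", "top500", "top1000", "rare"]

def normalize_text (text : String) : String :=
  PySem.Str.join " " (PySem.Str.split₀ (if text = "" then "" else text))

def FREQ_MAPPING : PySem.Dict String String :=
  PySem.Dict.ofList
    [("top-20", "top20"), ("top-50", "top50"), ("top-100", "top100"),
     ("top-500", "top500"), ("top-1000", "top1000")]

def normalize_frequency (value : String) : Option String :=
  let v := normalize_text value
  if v = "" then none else some (PySem.Dict.getD FREQ_MAPPING v v)

-- tier.split(","): the separator is non-empty, so split? never returns none and getD [] is exact
def splitComma (s : String) : List String := (PySem.Str.split? s ",").getD []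

-- A's normalize pass: nested for-loops appending truthy normalized values
def normalizeAll (tiers : List String) : List String :=
  tiers.foldl (fun acc tier =>
    (splitComma tier).foldl (fun acc2 part =>
      match normalize_frequency part with
      | some v => acc2 ++ [v]
      | none => acc2) acc) []

-- A's inner 'for freq in FREQUENCY_ORDER: allowed.add(freq); if freq == cutoff: break'
def addUntil : List String → String → PySem.Set String → PySem.Set String
  | [], _, s => s
  | f :: rest, cutoff, s =>
      let s' := PySem.Set.add s f
      if f = cutoff then s' else addUntil rest cutoff s'

def CUTOFF_MAP : PySem.Dict String String :=
  PySem.Dict.ofList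
    [("top20", "top20"), ("top100", "top100"), ("top500", "top500"), ("top1000", "top1000")]

-- one iteration of A's allowed-loop; none = the 'raise ValueError' branch
-- (the dict indexing CUTOFF_MAP[tier] is ported as getD: the guard guarantees the key is present)
def stepA (s : PySem.Set String) (tier : String) : Option (PySem.Set String) :=
  if tier = "top20" ∨ tier = "top100" ∨ tier = "top500" ∨ tier = "top1000" then
    let cutoff := PySem.Dict.getD CUTOFF_MAP tier tier
    some (addUntil FREQUENCY_ORDER cutoff s)
  else if tier ∈ FREQUENCY_ORDER then some (PySem.Set.add s tier)
  else none

def resolve_allowed_frequencies (tiers : List String) : Option (List String) :=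
  if tiers = [] then none
  else
    let normalized := normalizeAll tiers
    if normalized = [] then none
    else normalized.foldl (fun os t => os.bind (fun s => stepA s t)) (some PySem.Set.empty)

-- ===== PORT B =====
-- each canonical tier mapped to its exact allowed-set (prefix expansion precomputed)
def TIER_TABLE : PySem.Dict String (List String) :=
  PySem.Dict.ofList
    [("top20", ["top20"]), ("top50", ["top50"]),
     ("top100", ["top20", "top50", "top100"]),
     ("top500", ["top20", "top50", "top100", "top500"]),
     ("top1000", ["top20", "top50", "top100", "top500", "top1000"]),
     ("rare", ["rare"])]

-- one iteration of B's allowed-loop: allowed.update(TIER_TABLE[tier]); none = the except-KeyError raise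
def stepB (s : PySem.Set String) (tier : String) : Option (PySem.Set String) :=
  match PySem.Dict.get? TIER_TABLE tier with
  | some fs => some (PySem.Set.update s fs)
  | none => none

def resolve_allowed_frequencies_alt (tiers : List String) : Option (List String) :=
  if tiers = [] then none
  else
    let normalized := (tiers.flatMap splitComma).filterMap normalize_frequency
    if normalized = [] then none
    else normalized.foldl (fun os t => os.bind (fun s => stepB s t)) (some PySem.Set.empty)

-- ===== PRECONDITION & SPEC =====
-- Pre_ excludes exactly the inputs on which the Python A raises ValueError: some comma-separated
-- part normalizes to a non-empty value that is not one of the six canonical tiers.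
def Pre_resolve_allowed_frequencies (tiers : List String) : Prop :=
  ∀ t ∈ tiers, ∀ p ∈ splitComma t,
    ∀ v, normalize_frequency p = some v → v ∈ FREQUENCY_ORDER
instance (tiers : List String) : Decidable (Pre_resolve_allowed_frequencies tiers) := by
  unfold Pre_resolve_allowed_frequencies; infer_instance
def pvWitness_resolve_allowed_frequencies : List String := ["top100,rare", " top-20 "]

def Spec_resolve_allowed_frequencies (tiers : List String) (out : Option (List String)) : Prop := out = resolve_allowed_frequencies_alt tiers
instance (tiers : List String) (out : Option (List String)) : Decidable (Spec_resolve_allowed_frequencies tiers out) := by unfold Spec_resolve_allowed_frequencies; infer_instance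

-- ===== CLAIM (what is proved, stated in full; the proofs are below) =====
def Claim_equal_resolve_allowed_frequencies : Prop := ∀ (tiers : List String), Dom_resolve_allowed_frequencies tiers → Pre_resolve_allowed_frequencies tiers → Spec_resolve_allowed_frequencies tiers (resolve_allowed_frequencies tiers)

-- ===== LEMMAS AND PROOFS =====

-- A's inner part-loop appends exactly the filterMap of B's normalize pass
theorem inner_foldl_eq (l : List String) (acc : List String) :
    l.foldl (fun acc2 part =>
      match normalize_frequency part with
      | some v => acc2 ++ [v]
      | none => acc2) acc = acc ++ l.filterMap normalize_frequency := by
  induction l generalizing acc with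
  | nil => simp
  | cons hd tl ih =>
      simp only [List.foldl_cons, List.filterMap_cons]
      cases h : normalize_frequency hd <;> simp [ih]

-- A's nested normalize loops compute B's flatMap/filterMap normalized list
theorem normalizeAll_eq (tiers : List String) :
    normalizeAll tiers = (tiers.flatMap splitComma).filterMap normalize_frequency := by
  unfold normalizeAll
  suffices h : ∀ acc, tiers.foldl (fun acc tier =>
      (splitComma tier).foldl (fun acc2 part =>
        match normalize_frequency part with
        | some v => acc2 ++ [v]
        | none => acc2) acc) acc
      = acc ++ (tiers.flatMap splitComma).filterMap normalize_frequency by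
    simpa using h []
  induction tiers with
  | nil => simp
  | cons hd tl ih => intro acc; simp [inner_foldl_eq, List.flatMap_def, Function.comp_def]

-- A's scan-with-break expansion equals B's table lookup, tier by tier
theorem step_eq (s : PySem.Set String) (t : String) : stepA s t = stepB s t := by
  by_cases h20 : t = "top20"
  · subst h20; rfl
  by_cases h50 : t = "top50"
  · subst h50; rfl
  by_cases h100 : t = "top100"
  · subst h100; rfl
  by_cases h500 : t = "top500"
  · subst h500; rfl
  by_cases h1000 : t = "top1000"
  · subst h1000; rfl
  by_cases hrare : t = "rare"
  · subst hrare; rfl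
  have e20 : ("top20" == t) = false := beq_eq_false_iff_ne.mpr (Ne.symm h20)
  have e50 : ("top50" == t) = false := beq_eq_false_iff_ne.mpr (Ne.symm h50)
  have e100 : ("top100" == t) = false := beq_eq_false_iff_ne.mpr (Ne.symm h100)
  have e500 : ("top500" == t) = false := beq_eq_false_iff_ne.mpr (Ne.symm h500)
  have e1000 : ("top1000" == t) = false := beq_eq_false_iff_ne.mpr (Ne.symm h1000)
  have erare : ("rare" == t) = false := beq_eq_false_iff_ne.mpr (Ne.symm hrare)
  simp [stepA, stepB, FREQUENCY_ORDER, TIER_TABLE, PySem.Dict.get?, PySem.Dict.ofList,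
        PySem.Dict.update, PySem.Dict.empty, PySem.Dict.insert, List.find?,
        h20, h50, h100, h500, h1000, hrare, e20, e50, e100, e500, e1000, erare]

theorem fold_eq (l : List String) (os : Option (PySem.Set String)) :
    l.foldl (fun os t => os.bind (fun s => stepA s t)) os
      = l.foldl (fun os t => os.bind (fun s => stepB s t)) os := by
  simp only [step_eq]

-- ===== VERDICT (by name: the statement is the Claim_ definition above) =====
theorem resolve_allowed_frequencies_spec : Claim_equal_resolve_allowed_frequencies := by
  intro tiers _ _
  unfold Spec_resolve_allowed_frequencies resolve_allowed_frequencies resolve_allowed_frequencies_alt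
  simp only [normalizeAll_eq, fold_eq]
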